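-- pv_equiv track=rewrite | github.com/Mengqi-Lin/idQ | py/idQ.py | valid_three_column_submatrix
-- ===== SOURCE A (Python) =====
-- import itertools
--
-- def valid_three_column_submatrix(S):
--     """
--     Given a three-column submatrix S (of shape (J,3)), return True if there exists
--     a permutation of its columns so that the unique rows of S contain one of the following target sets:
--       1. The standard basis: {(1,0,0), (0,1,0), (0,0,1)}.
--       2. The set T2: {(1,1,0), (1,0,1), (0,1,1), (1,0,0)}.
--       3. The set T3: {(0,1,0), (0,0,1), (1,1,0), (1,0,1)}.
--     Otherwise, return False.
--     """
--     # Unique rows of S as tuples.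
--     U = {tuple(row) for row in S}
--     T1 = {(1,0,0), (0,1,0), (0,0,1)}
--     T2 = {(1,1,0), (1,0,1), (0,1,1), (1,0,0)}
--     T3 = {(0,1,0), (0,0,1), (1,1,0), (1,0,1)}
--
--     # Try every permutation of columns.
--     for perm in itertools.permutations(range(3)):
--         U_perm = {tuple(row[i] for i in perm) for row in S}
--         if T1.issubset(U_perm) or T2.issubset(U_perm) or T3.issubset(U_perm):
--             return True
--     return False
-- ===== SOURCE B (Python) =====
-- def valid_three_column_submatrix(S):
--     # One pass: record which of the six nonzero 0/1 triples occur as (row[0],row[1],row[2]).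
--     e1 = e2 = e3 = d12 = d13 = d23 = False
--     for row in S:
--         t = (row[0], row[1], row[2])
--         if t == (1, 0, 0):
--             e1 = True
--         elif t == (0, 1, 0):
--             e2 = True
--         elif t == (0, 0, 1):
--             e3 = True
--         elif t == (1, 1, 0):
--             d12 = True
--         elif t == (1, 0, 1):
--             d13 = True
--         elif t == (0, 1, 1):
--             d23 = True
--     # Symmetry-reduced closed form (no permutations needed):
--     # T1 = {100,010,001} is invariant under all column permutations.
--     if e1 and e2 and e3:
--         return True
--     # T2's images are: all three weight-2 vectors plus some unit vector.
--     if d12 and d13 and d23 and (e1 or e2 or e3):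
--         return True
--     # T3's images: for a distinguished column j, both units of the other
--     # columns and both weight-2 vectors containing j.
--     if e2 and e3 and d12 and d13:
--         return True
--     if e1 and e3 and d12 and d23:
--         return True
--     if e1 and e2 and d13 and d23:
--         return True
--     return False
-- ===== Notes on version B (the rewrite author's own statement) =====
-- stated objective: simpler
-- what changed: B drops the permutation loop and subset tests entirely: one pass over S sets six presence flags (which of the six nonzero 0/1 triples occur as a row's first three entries), then a fixed symmetry-reduced boolean formula over those flags decides the answer.
import Mathlib
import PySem

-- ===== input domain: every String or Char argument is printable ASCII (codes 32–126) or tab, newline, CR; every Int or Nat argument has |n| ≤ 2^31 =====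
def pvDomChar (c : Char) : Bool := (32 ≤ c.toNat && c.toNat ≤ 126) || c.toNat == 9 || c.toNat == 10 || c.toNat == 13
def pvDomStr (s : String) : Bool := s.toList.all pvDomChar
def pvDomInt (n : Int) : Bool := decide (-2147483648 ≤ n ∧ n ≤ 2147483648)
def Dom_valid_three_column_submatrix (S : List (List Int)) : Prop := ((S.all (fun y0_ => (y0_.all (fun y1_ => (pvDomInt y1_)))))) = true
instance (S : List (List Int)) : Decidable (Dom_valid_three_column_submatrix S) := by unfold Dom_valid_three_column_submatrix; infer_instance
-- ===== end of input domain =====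

-- B replaces A's loop over the six column permutations by ONE pass over S collecting six
-- presence flags and a closed-form, symmetry-reduced condition (objective: simpler).
-- Equivalence is proved on rows of length ≥ 3 (Pre_), where Python A returns.

-- ===== PORT A =====
-- tuple(row[i] for i in perm); row[i] ported as pyGetD (index in range under Pre_)
def pvRowPerm (perm : List Int) (row : List Int) : List Int :=
  perm.map (fun i => PySem.List.pyGetD row i 0)

def valid_three_column_submatrix (S : List (List Int)) : Bool :=
  let _U : PySem.Set (List Int) := PySem.Set.ofList S   -- A builds U but never uses it
  let T1 : PySem.Set (List Int) := PySem.Set.ofList [[1,0,0],[0,1,0],[0,0,1]]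
  let T2 : PySem.Set (List Int) := PySem.Set.ofList [[1,1,0],[1,0,1],[0,1,1],[1,0,0]]
  let T3 : PySem.Set (List Int) := PySem.Set.ofList [[0,1,0],[0,0,1],[1,1,0],[1,0,1]]
  (PySem.List.permutations ([0,1,2] : List Int) 3).any (fun perm =>
    let Uperm : PySem.Set (List Int) := PySem.Set.ofList (S.map (fun row => pvRowPerm perm row))
    PySem.Set.issubset T1 Uperm || PySem.Set.issubset T2 Uperm || PySem.Set.issubset T3 Uperm)

-- ===== PORT B =====
-- t = (row[0], row[1], row[2])
def pvT (r : List Int) : List Int :=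
  [PySem.List.pyGetD r 0 0, PySem.List.pyGetD r 1 0, PySem.List.pyGetD r 2 0]

-- B's loop body: the if/elif chain setting one of the six flags (e1,e2,e3,d12,d13,d23)
def pvStep (st : Bool × Bool × Bool × Bool × Bool × Bool) (row : List Int) :
    Bool × Bool × Bool × Bool × Bool × Bool :=
  match st with
  | (e1, e2, e3, d12, d13, d23) =>
    let t := pvT row
    if t = [1,0,0] then (true, e2, e3, d12, d13, d23)
    else if t = [0,1,0] then (e1, true, e3, d12, d13, d23)
    else if t = [0,0,1] then (e1, e2, true, d12, d13, d23)
    else if t = [1,1,0] then (e1, e2, e3, true, d13, d23)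
    else if t = [1,0,1] then (e1, e2, e3, d12, true, d23)
    else if t = [0,1,1] then (e1, e2, e3, d12, d13, true)
    else (e1, e2, e3, d12, d13, d23)

def valid_three_column_submatrix_alt (S : List (List Int)) : Bool :=
  match S.foldl pvStep (false, false, false, false, false, false) with
  | (e1, e2, e3, d12, d13, d23) =>
    if e1 && e2 && e3 then true
    else if d12 && d13 && d23 && (e1 || e2 || e3) then true
    else if e2 && e3 && d12 && d13 then true
    else if e1 && e3 && d12 && d23 then true
    else if e1 && e2 && d13 && d23 then true
    else false

-- ===== PRECONDITION & SPEC =====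
-- Pre_ excludes matrices with a row of fewer than 3 entries, on which Python A raises IndexError.
def Pre_valid_three_column_submatrix (S : List (List Int)) : Prop :=
  ∀ row ∈ S, 3 ≤ row.length
instance (S : List (List Int)) : Decidable (Pre_valid_three_column_submatrix S) := by
  unfold Pre_valid_three_column_submatrix; infer_instance

def pvWitness_valid_three_column_submatrix : List (List Int) := [[1,0,0],[0,1,0],[0,0,1]]

def Spec_valid_three_column_submatrix (S : List (List Int)) (out : Bool) : Prop := out = valid_three_column_submatrix_alt S
instance (S : List (List Int)) (out : Bool) : Decidable (Spec_valid_three_column_submatrix S out) := by unfold Spec_valid_three_column_submatrix; infer_instance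

-- ===== CLAIM (what is proved, stated in full; the proofs are below) =====
def Claim_equal_valid_three_column_submatrix : Prop := ∀ (S : List (List Int)), Dom_valid_three_column_submatrix S → Pre_valid_three_column_submatrix S → Spec_valid_three_column_submatrix S (valid_three_column_submatrix S)

-- ===== LEMMAS AND PROOFS =====

-- canonical atom: S has a row whose first three entries are (a, b, c)
def pvMem3 (S : List (List Int)) (a b c : Int) : Prop :=
  ∃ r ∈ S, PySem.List.pyGetD r 0 0 = a ∧ PySem.List.pyGetD r 1 0 = b ∧ PySem.List.pyGetD r 2 0 = c

-- B's flags: the foldl over pvStep computes exactly the six presence flags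
theorem pvFoldl_flags (S : List (List Int)) (a b c d e f : Bool) :
    S.foldl pvStep (a, b, c, d, e, f) =
      (a || S.any (fun r => pvT r = [1,0,0]),
       b || S.any (fun r => pvT r = [0,1,0]),
       c || S.any (fun r => pvT r = [0,0,1]),
       d || S.any (fun r => pvT r = [1,1,0]),
       e || S.any (fun r => pvT r = [1,0,1]),
       f || S.any (fun r => pvT r = [0,1,1])) := by
  induction S generalizing a b c d e f with
  | nil => simp
  | cons r S ih =>
    simp only [List.foldl_cons, pvStep, List.any_cons]
    split_ifs with h1 h2 h3 h4 h5 h6 <;>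
      rw [ih] <;> simp [*]

-- a flag holds iff the corresponding pvMem3 atom does
theorem pvFlag_iff (S : List (List Int)) (x y z : Int) :
    (S.any (fun r => pvT r = [x,y,z]) = true) ↔ pvMem3 S x y z := by
  simp [pvT, pvMem3, List.any_eq_true]

-- canonicalisers: one subset clause of A, for each of the six index patterns, as a pvMem3 atom
theorem cl_012 (S : List (List Int)) (a b c : Int) :
    (∃ r ∈ S, PySem.List.pyGetD r 0 0 = a ∧ PySem.List.pyGetD r 1 0 = b ∧ PySem.List.pyGetD r 2 0 = c)
      = pvMem3 S a b c := rfl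
theorem cl_021 (S : List (List Int)) (a b c : Int) :
    (∃ r ∈ S, PySem.List.pyGetD r 0 0 = a ∧ PySem.List.pyGetD r 2 0 = b ∧ PySem.List.pyGetD r 1 0 = c)
      = pvMem3 S a c b := by unfold pvMem3; exact propext (exists_congr fun r => by tauto)
theorem cl_102 (S : List (List Int)) (a b c : Int) :
    (∃ r ∈ S, PySem.List.pyGetD r 1 0 = a ∧ PySem.List.pyGetD r 0 0 = b ∧ PySem.List.pyGetD r 2 0 = c)
      = pvMem3 S b a c := by unfold pvMem3; exact propext (exists_congr fun r => by tauto)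
theorem cl_120 (S : List (List Int)) (a b c : Int) :
    (∃ r ∈ S, PySem.List.pyGetD r 1 0 = a ∧ PySem.List.pyGetD r 2 0 = b ∧ PySem.List.pyGetD r 0 0 = c)
      = pvMem3 S c a b := by unfold pvMem3; exact propext (exists_congr fun r => by tauto)
theorem cl_201 (S : List (List Int)) (a b c : Int) :
    (∃ r ∈ S, PySem.List.pyGetD r 2 0 = a ∧ PySem.List.pyGetD r 0 0 = b ∧ PySem.List.pyGetD r 1 0 = c)
      = pvMem3 S b c a := by unfold pvMem3; exact propext (exists_congr fun r => by tauto)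
theorem cl_210 (S : List (List Int)) (a b c : Int) :
    (∃ r ∈ S, PySem.List.pyGetD r 2 0 = a ∧ PySem.List.pyGetD r 1 0 = b ∧ PySem.List.pyGetD r 0 0 = c)
      = pvMem3 S c b a := by unfold pvMem3; exact propext (exists_congr fun r => by tauto)

-- the propositional core: A's 18 permuted-subset clauses ↔ B's 5 symmetry-reduced clauses
theorem pvShuffle (x100 x010 x001 x110 x101 x011 : Prop) :
    ((x100 ∧ x010 ∧ x001) ∨ (x110 ∧ x101 ∧ x011 ∧ x100) ∨ (x010 ∧ x001 ∧ x110 ∧ x101) ∨ (x100 ∧ x001 ∧ x010) ∨ (x101 ∧ x110 ∧ x011 ∧ x100) ∨ (x001 ∧ x010 ∧ x101 ∧ x110) ∨ (x010 ∧ x100 ∧ x001) ∨ (x110 ∧ x011 ∧ x101 ∧ x010) ∨ (x100 ∧ x001 ∧ x110 ∧ x011) ∨ (x010 ∧ x001 ∧ x100) ∨ (x011 ∧ x110 ∧ x101 ∧ x010) ∨ (x001 ∧ x100 ∧ x011 ∧ x110) ∨ (x001 ∧ x100 ∧ x010) ∨ (x101 ∧ x011 ∧ x110 ∧ x001) ∨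 (x100 ∧ x010 ∧ x101 ∧ x011) ∨ (x001 ∧ x010 ∧ x100) ∨ (x011 ∧ x101 ∧ x110 ∧ x001) ∨ (x010 ∧ x100 ∧ x011 ∧ x101)) ↔
    ((x100 ∧ x010 ∧ x001) ∨ (x110 ∧ x101 ∧ x011 ∧ (x100 ∨ x010 ∨ x001)) ∨ (x010 ∧ x001 ∧ x110 ∧ x101) ∨ (x100 ∧ x001 ∧ x110 ∧ x011) ∨ (x100 ∧ x010 ∧ x101 ∧ x011)) := by
  by_cases h1 : x100 <;> by_cases h2 : x010 <;> by_cases h3 : x001 <;>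
    by_cases h4 : x110 <;> by_cases h5 : x101 <;> by_cases h6 : x011 <;>
    simp only [h1, h2, h3, h4, h5, h6, and_true, and_false, or_true, or_false, iff_self]

-- the if/elif/return chain of B's final answer, as a disjunction
theorem pvChain (c1 c2 c3 c4 c5 : Bool) :
    (if c1 then true else if c2 then true else if c3 then true else if c4 then true
     else if c5 then true else false) = (c1 || c2 || c3 || c4 || c5) := by
  cases c1 <;> cases c2 <;> cases c3 <;> cases c4 <;> cases c5 <;> rfl

-- B as a proposition over the six atoms
theorem pvAlt_iff (S : List (List Int)) :
    valid_three_column_submatrix_alt S = true ↔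
      ((pvMem3 S 1 0 0 ∧ pvMem3 S 0 1 0 ∧ pvMem3 S 0 0 1) ∨
       (pvMem3 S 1 1 0 ∧ pvMem3 S 1 0 1 ∧ pvMem3 S 0 1 1 ∧ (pvMem3 S 1 0 0 ∨ pvMem3 S 0 1 0 ∨ pvMem3 S 0 0 1)) ∨
       (pvMem3 S 0 1 0 ∧ pvMem3 S 0 0 1 ∧ pvMem3 S 1 1 0 ∧ pvMem3 S 1 0 1) ∨
       (pvMem3 S 1 0 0 ∧ pvMem3 S 0 0 1 ∧ pvMem3 S 1 1 0 ∧ pvMem3 S 0 1 1) ∨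
       (pvMem3 S 1 0 0 ∧ pvMem3 S 0 1 0 ∧ pvMem3 S 1 0 1 ∧ pvMem3 S 0 1 1)) := by
  unfold valid_three_column_submatrix_alt
  rw [pvFoldl_flags]
  simp only [Bool.false_or]
  rw [pvChain]
  simp only [Bool.or_eq_true, Bool.and_eq_true, pvFlag_iff]
  tauto

set_option maxHeartbeats 1000000 in
theorem valid_three_column_submatrix_eq (S : List (List Int)) :
    valid_three_column_submatrix S = valid_three_column_submatrix_alt S := by
  have hP : PySem.List.permutations ([0,1,2] : List Int) 3 =
      [[0,1,2],[0,2,1],[1,0,2],[1,2,0],[2,0,1],[2,1,0]] := by decide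
  rw [Bool.eq_iff_iff, pvAlt_iff]
  simp only [valid_three_column_submatrix, hP,
    List.any_cons, List.any_nil, Bool.or_eq_true, PySem.Set.issubset_iff,
    PySem.Set.mem_ofList, List.mem_map, List.forall_mem_cons,
    List.not_mem_nil, false_implies, implies_true,
    pvRowPerm, List.map_cons, List.map_nil, List.cons.injEq, and_true]
  simp only [Bool.false_eq_true, or_false, or_assoc]
  simp only [cl_012, cl_021, cl_102, cl_120, cl_201, cl_210]
  exact pvShuffle (pvMem3 S 1 0 0) (pvMem3 S 0 1 0) (pvMem3 S 0 0 1)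
    (pvMem3 S 1 1 0) (pvMem3 S 1 0 1) (pvMem3 S 0 1 1)

-- ===== VERDICT (by name: the statement is the Claim_ definition above) =====
theorem valid_three_column_submatrix_spec : Claim_equal_valid_three_column_submatrix := by
  intro S _ _
  exact valid_three_column_submatrix_eq S
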